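-- pv_equiv track=rewrite | github.com/mauduong/JustPythonStuff | fantasygameinventory.py | addToInventory
-- ===== SOURCE A (Python) =====
-- def addToInventory(inventory, addedLoot):
--     for item in addedLoot:
--         inventory.setdefault(item, 0)
--         if item == 'Souls':
--             inventory[item] += 3600
--         else:
--             inventory[item] += 1
--     return inventory
-- ===== SOURCE B (Python) =====
-- def addToInventory(inventory, addedLoot):
--     # Two-pass: tally the loot first, then apply each distinct item's weighted count once.
--     counts = {}
--     for item in addedLoot:
--         counts[item] = counts.get(item, 0) + 1
--     for item, c in counts.items():
--         inventory[item] = inventory.get(item, 0) + c * (3600 if item == 'Souls' else 1)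
--     return inventory
-- ===== Notes on version B (the rewrite author's own statement) =====
-- stated objective: alternative
-- what changed: Replaced the per-element setdefault/increment loop with a two-pass tally-then-apply structure: build a frequency table of addedLoot, then do one weighted dict write per distinct item.
import Mathlib
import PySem

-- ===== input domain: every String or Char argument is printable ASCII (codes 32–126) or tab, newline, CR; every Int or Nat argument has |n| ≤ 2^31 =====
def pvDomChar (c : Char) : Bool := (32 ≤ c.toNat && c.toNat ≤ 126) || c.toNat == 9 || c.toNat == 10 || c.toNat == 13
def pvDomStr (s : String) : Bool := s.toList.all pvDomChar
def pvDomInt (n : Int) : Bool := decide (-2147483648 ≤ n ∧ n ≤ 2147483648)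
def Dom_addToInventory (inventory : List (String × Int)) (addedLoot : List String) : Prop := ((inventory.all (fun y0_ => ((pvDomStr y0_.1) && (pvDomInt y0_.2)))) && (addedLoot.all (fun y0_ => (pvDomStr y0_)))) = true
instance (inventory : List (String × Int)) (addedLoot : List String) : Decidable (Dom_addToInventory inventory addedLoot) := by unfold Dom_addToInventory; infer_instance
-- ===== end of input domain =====

-- B replaces A's per-element increment loop by a tally-then-apply two-pass structure (same cost;
-- the equivalence proved is about the RETURN value; both Pythons also mutate `inventory` in place identically).

-- ===== PORT A =====
def addToInventory (inventory : List (String × Int)) (addedLoot : List String) : List (String × Int) :=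
  (addedLoot.foldl (fun d item =>
      let d := d.setdefault item 0
      if item == "Souls" then d.modify item 0 (· + 3600)
      else d.modify item 0 (· + 1))
    (PySem.Dict.mk inventory)).items

-- ===== PORT B =====
def addToInventory_alt (inventory : List (String × Int)) (addedLoot : List String) : List (String × Int) :=
  let counts := addedLoot.foldl (fun c item => c.insert item (c.getD item 0 + 1)) PySem.Dict.empty
  (counts.items.foldl (fun d p =>
      d.insert p.1 (d.getD p.1 0 + p.2 * (if p.1 == "Souls" then 3600 else 1)))
    (PySem.Dict.mk inventory)).items

-- ===== PRECONDITION & SPEC =====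
-- Pre_ requires distinct keys: `inventory` is a Python dict, whose association-list image cannot repeat a key.
def Pre_addToInventory (inventory : List (String × Int)) (addedLoot : List String) : Prop :=
  (inventory.map Prod.fst).Nodup
instance (inventory : List (String × Int)) (addedLoot : List String) : Decidable (Pre_addToInventory inventory addedLoot) := by unfold Pre_addToInventory; infer_instance
def pvWitness_addToInventory : (List (String × Int)) × List String :=
  ([("Souls", 2), ("gold coin", 42)], ["dagger", "Souls", "dagger"])
def Spec_addToInventory (inventory : List (String × Int)) (addedLoot : List String) (out : List (String × Int)) : Prop := out = addToInventory_alt inventory addedLoot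
instance (inventory : List (String × Int)) (addedLoot : List String) (out : List (String × Int)) : Decidable (Spec_addToInventory inventory addedLoot out) := by unfold Spec_addToInventory; infer_instance

-- ===== CLAIM (what is proved, stated in full; the proofs are below) =====
def Claim_equal_addToInventory : Prop := ∀ (inventory : List (String × Int)) (addedLoot : List String), Dom_addToInventory inventory addedLoot → Pre_addToInventory inventory addedLoot → Spec_addToInventory inventory addedLoot (addToInventory inventory addedLoot)

-- ===== LEMMAS AND PROOFS =====

-- the per-item weight
def pvW (k : String) : Int := if k == "Souls" then 3600 else 1

-- A's loop body is a single weighted insert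
theorem pvStepA_eq (d : PySem.Dict String Int) (x : String) :
    (let d' := d.setdefault x 0;
     if x == "Souls" then d'.modify x 0 (· + 3600) else d'.modify x 0 (· + 1))
      = d.insert x (d.getD x 0 + pvW x) := by
  have core : ∀ (w : Int), (d.setdefault x 0).modify x 0 (· + w) = d.insert x (d.getD x 0 + w) := by
    intro w
    by_cases h : d.contains x = true
    · rw [PySem.Dict.setdefault_of_contains (h := h)]; rfl
    · rw [PySem.Dict.setdefault_of_not_contains (h := by simpa using h),
          PySem.Dict.modify, PySem.Dict.getD_insert_self, PySem.Dict.insert_insert_self,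
          PySem.Dict.getD_of_not_contains (h := by simpa using h)]
  by_cases hx : x == "Souls" <;> simp only [pvW, hx, if_true, if_false, Bool.false_eq_true] <;>
    exact core _

-- value of A's fold at any key
theorem pvGetD_A (loot : List String) (d : PySem.Dict String Int) (k : String) :
    (loot.foldl (fun d x => d.insert x (d.getD x 0 + pvW x)) d).getD k 0
      = d.getD k 0 + (loot.count k : Int) * pvW k := by
  induction loot generalizing d with
  | nil => simp
  | cons x xs ih =>
    simp only [List.foldl_cons, ih, PySem.Dict.getD_insert]
    by_cases hk : k = x
    · subst hk; simp; ring
    · simp [hk, Ne.symm hk]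

-- value of B's apply-fold at any key
theorem pvGetD_B (l : List (String × Int)) (d : PySem.Dict String Int) (k : String) :
    (l.foldl (fun d p => d.insert p.1 (d.getD p.1 0 + p.2 * pvW p.1)) d).getD k 0
      = d.getD k 0 + ((l.filter (fun p => p.1 == k)).map Prod.snd).sum * pvW k := by
  induction l generalizing d with
  | nil => simp
  | cons p ps ih =>
    simp only [List.foldl_cons, ih, PySem.Dict.getD_insert, List.filter_cons]
    by_cases hk : k = p.1
    · simp [← hk]; ring
    · simp [Ne.symm hk, beq_iff_eq, hk]

-- filtering a graph of a Nodup list at one key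
theorem pvFilter_graph (xs : List String) (g : String → Int) (k : String) (h : xs.Nodup) :
    (xs.map (fun a => (a, g a))).filter (fun p => p.1 == k)
      = if k ∈ xs then [(k, g k)] else [] := by
  induction xs with
  | nil => simp
  | cons a as ih =>
    simp only [List.nodup_cons] at h
    simp only [List.map_cons, List.filter_cons]
    by_cases hk : a = k
    · have hfil : (as.map (fun a => (a, g a))).filter (fun p => p.1 == k) = [] := by
        apply List.filter_eq_nil_iff.mpr
        intro p hp
        obtain ⟨b, hb, rfl⟩ := List.mem_map.mp hp
        simp only [beq_iff_eq]
        exact fun e => h.1 (by rw [hk, ← e]; exact hb)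
      simp [hk, hfil]
    · simpa [hk, Ne.symm hk] using ih h.2

theorem addToInventory_eq (inventory : List (String × Int)) (addedLoot : List String)
    (hnd : (inventory.map Prod.fst).Nodup) :
    addToInventory inventory addedLoot = addToInventory_alt inventory addedLoot := by
  unfold addToInventory addToInventory_alt
  have hstep : (fun (d : PySem.Dict String Int) item =>
      (let d' := d.setdefault item 0;
       if item == "Souls" then d'.modify item 0 (· + 3600) else d'.modify item 0 (· + 1)))
      = fun d x => d.insert x (d.getD x 0 + pvW x) := by
    funext d x; exact pvStepA_eq d x
  have happly : (fun (d : PySem.Dict String Int) (p : String × Int) =>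
      d.insert p.1 (d.getD p.1 0 + p.2 * (if p.1 == "Souls" then 3600 else 1)))
      = fun d p => d.insert p.1 (d.getD p.1 0 + p.2 * pvW p.1) := by
    funext d p; rfl
  simp only [hstep, happly]
  set d0 : PySem.Dict String Int := PySem.Dict.mk inventory with hd0
  have hkeys0 : d0.keys = inventory.map Prod.fst := rfl
  have hnd0 : d0.keys.Nodup := by rw [hkeys0]; exact hnd
  have hcounter : addedLoot.foldl (fun c x => c.insert x (c.getD x 0 + 1)) PySem.Dict.empty
      = PySem.Dict.counter addedLoot := PySem.Dict.foldl_insert_getD_add_one_eq_counter addedLoot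
  rw [hcounter]
  set dA := addedLoot.foldl (fun d x => d.insert x (d.getD x 0 + pvW x)) d0 with hdA
  set dB := (PySem.Dict.counter addedLoot).items.foldl
      (fun d p => d.insert p.1 (d.getD p.1 0 + p.2 * pvW p.1)) d0 with hdB
  -- keys agree
  have hkA : dA.keys = PySem.Set.update d0.keys addedLoot := PySem.Dict.keys_foldl_insert _ _ _
  have hkB : dB.keys = PySem.Set.update d0.keys addedLoot := by
    rw [hdB, PySem.Dict.keys_foldl_insert_key]
    have : (PySem.Dict.counter addedLoot).items.map Prod.fst = PySem.Set.ofList addedLoot := by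
      rw [PySem.Dict.items_counter, List.map_map]
      exact (List.map_congr_left (fun a _ => rfl)).trans (List.map_id _)
    rw [this, PySem.Set.update_eq_append_filter, PySem.Set.update_eq_append_filter,
        PySem.Set.ofList_ofList]
  have hkeys : dA.keys = dB.keys := by rw [hkA, hkB]
  -- nodup of result keys
  have hndA : dA.keys.Nodup := PySem.Dict.nodup_keys_foldl_insert _ _ _ hnd0
  have hndB : dB.keys.Nodup := PySem.Dict.nodup_keys_foldl_insert_key _ _ _ _ hnd0
  -- values agree at every key
  have hval : ∀ k, dA.getD k 0 = dB.getD k 0 := by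
    intro k
    rw [hdA, hdB, pvGetD_A, pvGetD_B, PySem.Dict.items_counter,
        pvFilter_graph _ _ _ (PySem.Set.nodup_ofList addedLoot)]
    by_cases hk : k ∈ addedLoot
    · simp only [PySem.Set.mem_ofList, hk, if_true]
      simp
    · simp only [PySem.Set.mem_ofList, hk, if_false]
      simp [List.count_eq_zero.mpr hk]
  rw [PySem.Dict.items_eq_map_keys dA hndA 0, PySem.Dict.items_eq_map_keys dB hndB 0, hkeys]
  exact List.map_congr_left (fun k _ => by rw [hval k])

-- ===== VERDICT (by name: the statement is the Claim_ definition above) =====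
theorem addToInventory_spec : Claim_equal_addToInventory := by
  intro inventory addedLoot _ hpre
  exact addToInventory_eq inventory addedLoot hpre
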